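-- pv_equiv track=rewrite | github.com/NDArkh/ITMO_sem1_py_lw2 | main.py | get_pattern_matrix
-- ===== SOURCE A (Python) =====
-- def get_pattern_matrix(width: int, height: int) -> list[list[int]]:
--     line_patterns = [
--         [0, 0, 0, 1, 1, 1, 1, 0, 0, 0, 0, 0] * 2,
--         [0, 1, 1, 0, 0, 0, 0, 1, 1, 0, 0, 0] * 2,
--         [1, 1, 0, 0, 0, 0, 0, 0, 1, 1, 0, 0] * 2,
--         [0, 1, 1, 0, 0, 0, 0, 1, 1, 0, 0, 0] * 2,
--         [0, 0, 0, 1, 1, 1, 1, 0, 0, 0, 0, 0] * 2,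
--         [0, 0, 0, 0, 0, 0, 0, 0, 0, 0, 0, 0] * 2
--     ]
--     pattern_width = len(line_patterns[0])
--     pattern_height = len(line_patterns)
--     matrix = list()
--     for i in range(height):
--         matrix.append(
--             (
--                     line_patterns[i % pattern_height]
--                     * (width // pattern_width + 1)
--             )
--             [:width]
--         )
--
--     return matrix
-- ===== SOURCE B (Python) =====
-- def get_pattern_matrix(width: int, height: int) -> list[list[int]]:
--     # each of the 6 base rows bit-packed into an integer (bit j = value at column j)
--     masks = [120, 390, 771, 390, 120, 0]
--     return [[(masks[i % 6] >> (j % 12)) & 1 for j in range(width)]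
--             for i in range(height)]
-- ===== Notes on version B (the rewrite author's own statement) =====
-- stated objective: alternative
-- what changed: B replaces A's table of doubled list rows, row replication by list multiplication and slicing with six bit-packed integer row masks, extracting each cell as (masks[i % 6] >> (j % 12)) & 1.
import Mathlib
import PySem

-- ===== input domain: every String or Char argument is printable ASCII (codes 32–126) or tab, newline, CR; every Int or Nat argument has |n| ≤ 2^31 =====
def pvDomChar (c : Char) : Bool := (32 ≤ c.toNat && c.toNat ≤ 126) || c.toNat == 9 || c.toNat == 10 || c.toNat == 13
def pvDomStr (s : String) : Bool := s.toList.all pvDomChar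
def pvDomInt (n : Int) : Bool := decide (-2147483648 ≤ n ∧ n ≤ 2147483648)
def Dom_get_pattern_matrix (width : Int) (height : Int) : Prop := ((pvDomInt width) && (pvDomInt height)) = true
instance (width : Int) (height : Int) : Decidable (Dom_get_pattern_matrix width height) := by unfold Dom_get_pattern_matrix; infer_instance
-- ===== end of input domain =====

-- B replaces A's table of doubled rows, row replication by list multiplication and
-- slicing with six bit-packed row masks: each cell is extracted as
-- (masks[i % 6] >> (j % 12)) & 1 (objective: alternative data structure, simpler code).

-- ===== PORT A =====
def get_pattern_matrix (width : Int) (height : Int) : List (List Int) :=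
  let line_patterns : List (List Int) := [
    PySem.List.pyRepeat [0, 0, 0, 1, 1, 1, 1, 0, 0, 0, 0, 0] 2,
    PySem.List.pyRepeat [0, 1, 1, 0, 0, 0, 0, 1, 1, 0, 0, 0] 2,
    PySem.List.pyRepeat [1, 1, 0, 0, 0, 0, 0, 0, 1, 1, 0, 0] 2,
    PySem.List.pyRepeat [0, 1, 1, 0, 0, 0, 0, 1, 1, 0, 0, 0] 2,
    PySem.List.pyRepeat [0, 0, 0, 1, 1, 1, 1, 0, 0, 0, 0, 0] 2,
    PySem.List.pyRepeat [0, 0, 0, 0, 0, 0, 0, 0, 0, 0, 0, 0] 2]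
  let pattern_width : Int := ((PySem.List.pyGetD line_patterns 0 []).length : Int)
  let pattern_height : Int := (line_patterns.length : Int)
  (PySem.List.pyRange 0 height 1).foldl
    (fun matrix i =>
      matrix ++ [PySem.List.slice
        (PySem.List.pyRepeat
          (PySem.List.pyGetD line_patterns (PySem.Int.mod i pattern_height) [])
          (PySem.Int.floordiv width pattern_width + 1))
        none (some width)])
    []

-- ===== PORT B =====
-- Source B's six bit-packed row masks (all nonnegative in Python, hence Nat here;
-- '>>'/'&' are ported exactly by Nat.shiftRight/Nat.land and the result cast to Int)
def pvMasks : List Nat := [120, 390, 771, 390, 120, 0]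

def get_pattern_matrix_alt (width : Int) (height : Int) : List (List Int) :=
  (PySem.List.pyRange 0 height 1).map (fun i =>
    (PySem.List.pyRange 0 width 1).map (fun j =>
      ((((PySem.List.pyGetD pvMasks (PySem.Int.mod i 6) 0) >>>
          (PySem.Int.mod j 12).toNat) &&& 1 : Nat) : Int)))

-- ===== PRECONDITION & SPEC =====
def Spec_get_pattern_matrix (width : Int) (height : Int) (out : List (List Int)) : Prop := out = get_pattern_matrix_alt width height
instance (width : Int) (height : Int) (out : List (List Int)) : Decidable (Spec_get_pattern_matrix width height out) := by unfold Spec_get_pattern_matrix; infer_instance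

-- ===== CLAIM (what is proved, stated in full; the proofs are below) =====
def Claim_equal_get_pattern_matrix : Prop := ∀ (width : Int) (height : Int), Dom_get_pattern_matrix width height → Spec_get_pattern_matrix width height (get_pattern_matrix width height)

-- ===== LEMMAS AND PROOFS =====

-- proof-side table: the 6x12 base rows as lists (used only to factor the proof)
def pvBase : List (List Int) := [
  [0, 0, 0, 1, 1, 1, 1, 0, 0, 0, 0, 0],
  [0, 1, 1, 0, 0, 0, 0, 1, 1, 0, 0, 0],
  [1, 1, 0, 0, 0, 0, 0, 0, 1, 1, 0, 0],
  [0, 1, 1, 0, 0, 0, 0, 1, 1, 0, 0, 0],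
  [0, 0, 0, 1, 1, 1, 1, 0, 0, 0, 0, 0],
  [0, 0, 0, 0, 0, 0, 0, 0, 0, 0, 0, 0]]

-- a list equals the table of its entries
lemma map_getD_range (L : List Int) : (List.range L.length).map (fun t => L.getD t 0) = L := by
  apply List.ext_getElem
  · simp
  · intro n h1 h2
    simp [List.getD_eq_getElem?_getD, List.getElem?_eq_getElem h2]

-- flattening k copies of L tabulates L cyclically
lemma flatten_replicate_eq_map (L : List Int) (k : Nat) :
    (List.replicate k L).flatten = (List.range (k * L.length)).map (fun t => L.getD (t % L.length) 0) := by
  induction k with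
  | zero => simp
  | succ k ih =>
    have hrange : (k + 1) * L.length = L.length + k * L.length := by ring
    rw [List.replicate_succ, List.flatten_cons, ih, hrange, List.range_add, List.map_append]
    congr 1
    · conv_lhs => rw [← map_getD_range L]
      apply List.map_congr_left
      intro t ht
      have : t % L.length = t := Nat.mod_eq_of_lt (List.mem_range.1 ht)
      rw [this]
    · rw [List.map_map]
      apply List.map_congr_left
      intro t _
      simp [Nat.add_mod_left]

-- the generic row fact: replicate the doubled row and slice to w  =  tabulate b12 mod 12
lemma row_eq (b12 : List Int) (h12 : b12.length = 12) (w : Int) :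
    PySem.List.slice (PySem.List.pyRepeat (b12 ++ b12) (PySem.Int.floordiv w 24 + 1)) none (some w)
      = (PySem.List.pyRange 0 w 1).map (fun j => PySem.List.pyGetD b12 (PySem.Int.mod j 12) 0) := by
  have h24 : (b12 ++ b12).length = 24 := by simp [h12]
  rcases lt_or_ge w 0 with hw | hw
  · have hq : PySem.Int.floordiv w 24 < 0 := by
      rw [PySem.Int.floordiv_lt_iff_lt_mul (by norm_num : (0:Int) < 24)]
      omega
    have hrep : PySem.List.pyRepeat (b12 ++ b12) (PySem.Int.floordiv w 24 + 1) = [] := by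
      unfold PySem.List.pyRepeat
      rw [Int.toNat_of_nonpos (by omega)]
      simp
    rw [PySem.List.pyRange_one_eq_nil (by omega), hrep]
    simp [PySem.List.slice]
  · set q := PySem.Int.floordiv w 24 with hqdef
    have hqm := PySem.Int.floordiv_mul_add_mod w 24
    have hm0 : 0 ≤ PySem.Int.mod w 24 := PySem.Int.mod_nonneg w (by norm_num)
    have hm1 : PySem.Int.mod w 24 < 24 := PySem.Int.mod_lt w (by norm_num)
    have hq0 : 0 ≤ q := by rw [hqdef, PySem.Int.le_floordiv_iff_mul_le (by norm_num : (0:Int) < 24)]; omega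
    have hk : (q + 1).toNat * 24 = ((q + 1) * 24).toNat := by
      rw [Int.toNat_mul (by omega) (by norm_num)]; rfl
    have hwk : w.toNat ≤ (q + 1).toNat * (b12 ++ b12).length := by
      rw [h24, hk]; omega
    rw [PySem.List.slice_to _ hw, PySem.List.pyRepeat, flatten_replicate_eq_map,
        PySem.List.pyRange_one]
    rw [List.map_map]
    have hwk' : w.toNat ≤ (q + 1).toNat * 24 := by rw [h24] at hwk; omega
    rw [← List.map_take, List.take_range, h24, min_eq_left hwk', sub_zero]
    apply List.ext_getElem
    · simp
    · intro t h1 h2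
      simp only [List.getElem_map, List.getElem_range, Function.comp]
      have hsub : (0 : Int) + (t : Int) = (t : Int) := by ring
      rw [hsub]
      have hmod12 : PySem.Int.mod (t : Int) 12 = ((t % 12 : Nat) : Int) := by
        rw [show (12:Int) = ((12:Nat):Int) from rfl]
        exact PySem.Int.mod_natCast t 12
      rw [hmod12, PySem.List.pyGetD_natCast]
      rcases lt_or_ge (t % 24) 12 with hu | hu
      · rw [List.getD_append b12 b12 0 (t % 24) (by omega)]
        congr 1
        omega
      · rw [List.getD_append_right b12 b12 0 (t % 24) (by omega), h12]
        congr 1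
        omega

-- each row of A's pattern table is the corresponding base row doubled
lemma pat_eq (r : Int) (h0 : 0 ≤ r) (h6 : r < 6) :
    PySem.List.pyGetD ([
      PySem.List.pyRepeat ([0, 0, 0, 1, 1, 1, 1, 0, 0, 0, 0, 0] : List Int) 2,
      PySem.List.pyRepeat [0, 1, 1, 0, 0, 0, 0, 1, 1, 0, 0, 0] 2,
      PySem.List.pyRepeat [1, 1, 0, 0, 0, 0, 0, 0, 1, 1, 0, 0] 2,
      PySem.List.pyRepeat [0, 1, 1, 0, 0, 0, 0, 1, 1, 0, 0, 0] 2,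
      PySem.List.pyRepeat [0, 0, 0, 1, 1, 1, 1, 0, 0, 0, 0, 0] 2,
      PySem.List.pyRepeat [0, 0, 0, 0, 0, 0, 0, 0, 0, 0, 0, 0] 2] : List (List Int)) r []
      = PySem.List.pyGetD pvBase r [] ++ PySem.List.pyGetD pvBase r [] := by
  interval_cases r <;> decide

lemma base_len (r : Int) (h0 : 0 ≤ r) (h6 : r < 6) :
    (PySem.List.pyGetD pvBase r []).length = 12 := by
  interval_cases r <;> decide

-- the bit extraction of B equals the list lookup in pvBase, cell by cell
lemma cell_eq (r c : Int) (hr0 : 0 ≤ r) (hr6 : r < 6) (hc0 : 0 ≤ c) (hc12 : c < 12) :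
    PySem.List.pyGetD (PySem.List.pyGetD pvBase r []) c 0
      = ((((PySem.List.pyGetD pvMasks r 0) >>> c.toNat) &&& 1 : Nat) : Int) := by
  interval_cases r <;> interval_cases c <;> decide

-- ===== VERDICT (by name: the statement is the Claim_ definition above) =====
theorem get_pattern_matrix_spec : Claim_equal_get_pattern_matrix := by
  unfold Claim_equal_get_pattern_matrix
  intro width height _
  unfold Spec_get_pattern_matrix get_pattern_matrix get_pattern_matrix_alt
  dsimp only
  simp only [PySem.List.foldl_append_singleton_eq_map, List.nil_append]
  apply List.map_congr_left
  intro i hi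
  have h0i : 0 ≤ i := (PySem.List.mem_pyRange_one.1 hi).1
  have hm0 : 0 ≤ PySem.Int.mod i 6 := PySem.Int.mod_nonneg i (by norm_num)
  have hm6 : PySem.Int.mod i 6 < 6 := PySem.Int.mod_lt i (by norm_num)
  have hlen : ((PySem.List.pyGetD ([
    PySem.List.pyRepeat ([0, 0, 0, 1, 1, 1, 1, 0, 0, 0, 0, 0] : List Int) 2,
    PySem.List.pyRepeat [0, 1, 1, 0, 0, 0, 0, 1, 1, 0, 0, 0] 2,
    PySem.List.pyRepeat [1, 1, 0, 0, 0, 0, 0, 0, 1, 1, 0, 0] 2,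
    PySem.List.pyRepeat [0, 1, 1, 0, 0, 0, 0, 1, 1, 0, 0, 0] 2,
    PySem.List.pyRepeat [0, 0, 0, 1, 1, 1, 1, 0, 0, 0, 0, 0] 2,
    PySem.List.pyRepeat [0, 0, 0, 0, 0, 0, 0, 0, 0, 0, 0, 0] 2] : List (List Int)) 0 []).length : Int) = 24 := by decide
  simp only [List.length_cons, List.length_nil, hlen]
  rw [show (((0+1+1+1+1+1+1 : Nat)) : Int) = 6 from by norm_num]
  rw [pat_eq (PySem.Int.mod i 6) hm0 hm6]
  rw [row_eq _ (base_len _ hm0 hm6) width]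
  apply List.map_congr_left
  intro j hj
  have hc0 : 0 ≤ PySem.Int.mod j 12 := PySem.Int.mod_nonneg j (by norm_num)
  have hc12 : PySem.Int.mod j 12 < 12 := PySem.Int.mod_lt j (by norm_num)
  exact cell_eq _ _ hm0 hm6 hc0 hc12
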